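-- pv_equiv track=rewrite | github.com/eastenzero/course-management-system | course-management-system/data-generator/generators/course_scheduling_constraints.py | validate_weekly_distribution
-- ===== SOURCE A (Python) =====
-- from typing import Dict, List, Set, Tuple, Optional
-- from enum import Enum
--
-- class TimeSlot(Enum):
--     """时间段枚举"""
--     MORNING_1 = "08:00-08:45"      # 第1节
--     MORNING_2 = "08:50-09:35"      # 第2节
--     MORNING_3 = "09:50-10:35"      # 第3节
--     MORNING_4 = "10:40-11:25"      # 第4节
--     MORNING_5 = "11:30-12:15"      # 第5节
--
--     AFTERNOON_1 = "14:00-14:45"    # 第6节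
--     AFTERNOON_2 = "14:50-15:35"    # 第7节
--     AFTERNOON_3 = "15:50-16:35"    # 第8节
--     AFTERNOON_4 = "16:40-17:25"    # 第9节
--     AFTERNOON_5 = "17:30-18:15"    # 第10节
--
--     EVENING_1 = "19:00-19:45"      # 第11节
--     EVENING_2 = "19:50-20:35"      # 第12节
--
-- def validate_weekly_distribution(course_schedule: List[Tuple[str, TimeSlot]],
--                                max_per_day: int = 2) -> bool:
--     """验证周内分布合理性"""
--     daily_count = {}
--
--     for day, time_slot in course_schedule:
--         daily_count[day] = daily_count.get(day, 0) + 1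
--         if daily_count[day] > max_per_day:
--             return False
--
--     return True
-- ===== SOURCE B (Python) =====
-- def validate_weekly_distribution(course_schedule, max_per_day=2):
--     """Count-everything-then-verify: project out the days, then check every
--     day's total occurrence count against the limit."""
--     days = [day for day, _ in course_schedule]
--     return all(days.count(day) <= max_per_day for day in days)
-- ===== Notes on version B (the rewrite author's own statement) =====
-- stated objective: simpler
-- what changed: Replaced the dict-accumulating loop with early exit by a two-phase count-then-verify: project the day list and return all(days.count(day) <= max_per_day); no dict, no in-loop check.
import Mathlib
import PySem

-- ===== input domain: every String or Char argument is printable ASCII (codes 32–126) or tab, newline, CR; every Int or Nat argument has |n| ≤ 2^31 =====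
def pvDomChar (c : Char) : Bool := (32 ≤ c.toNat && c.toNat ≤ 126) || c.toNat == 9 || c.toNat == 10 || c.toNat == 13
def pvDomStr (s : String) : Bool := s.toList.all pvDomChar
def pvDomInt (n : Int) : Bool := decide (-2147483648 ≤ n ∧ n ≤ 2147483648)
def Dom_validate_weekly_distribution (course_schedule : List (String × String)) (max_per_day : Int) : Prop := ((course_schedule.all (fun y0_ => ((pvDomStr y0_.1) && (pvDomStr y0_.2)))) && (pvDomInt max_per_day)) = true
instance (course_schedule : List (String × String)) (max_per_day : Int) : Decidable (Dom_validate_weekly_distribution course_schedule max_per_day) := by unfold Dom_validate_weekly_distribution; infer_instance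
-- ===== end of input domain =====

-- B replaces A's dict-accumulating early-exit loop by a two-phase count-then-verify over the day list (objective: simpler).
-- ===== PORT A =====
-- A's 'for day, time_slot in course_schedule' loop: daily_count is the dict, with the early 'return False' inside
def vwdLoop (cs : List (String × String)) (daily_count : PySem.Dict String Int) (max_per_day : Int) : Bool :=
  match cs with
  | [] => true
  | (day, _) :: rest =>
    let c := daily_count.getD day 0 + 1
    let d' := daily_count.insert day c
    if c > max_per_day then false else vwdLoop rest d' max_per_day

def validate_weekly_distribution (course_schedule : List (String × String)) (max_per_day : Int) : Bool :=
  vwdLoop course_schedule PySem.Dict.empty max_per_day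

-- ===== PORT B =====
def validate_weekly_distribution_alt (course_schedule : List (String × String)) (max_per_day : Int) : Bool :=
  let days := course_schedule.map Prod.fst
  days.all (fun day => decide ((days.count day : Int) ≤ max_per_day))

-- ===== PRECONDITION & SPEC =====
def Spec_validate_weekly_distribution (course_schedule : List (String × String)) (max_per_day : Int) (out : Bool) : Prop := out = validate_weekly_distribution_alt course_schedule max_per_day
instance (course_schedule : List (String × String)) (max_per_day : Int) (out : Bool) : Decidable (Spec_validate_weekly_distribution course_schedule max_per_day out) := by unfold Spec_validate_weekly_distribution; infer_instance

-- ===== CLAIM (what is proved, stated in full; the proofs are below) =====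
def Claim_equal_validate_weekly_distribution : Prop := ∀ (course_schedule : List (String × String)) (max_per_day : Int), Dom_validate_weekly_distribution course_schedule max_per_day → Spec_validate_weekly_distribution course_schedule max_per_day (validate_weekly_distribution course_schedule max_per_day)

-- ===== LEMMAS AND PROOFS =====

-- A's loop, from any starting dict d, equals the count-then-verify check offset by d's current tallies.
lemma vwdLoop_eq (cs : List (String × String)) (d : PySem.Dict String Int) (m : Int) :
    vwdLoop cs d m =
      (cs.map Prod.fst).all
        (fun day => decide (d.getD day 0 + ((cs.map Prod.fst).count day : Int) ≤ m)) := by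
  induction cs generalizing d with
  | nil => rfl
  | cons p rest ih =>
    obtain ⟨day, t⟩ := p
    simp only [vwdLoop, List.map_cons, List.all_cons]
    by_cases hgt : d.getD day 0 + 1 > m
    · rw [if_pos hgt]
      have hc : ¬ (d.getD day 0 + ((List.count day (day :: rest.map Prod.fst) : Nat) : Int) ≤ m) := by
        rw [List.count_cons_self]
        have := Int.natCast_nonneg (List.count day (rest.map Prod.fst))
        push_cast
        omega
      rw [Bool.eq_iff_iff]
      simp only [Bool.and_eq_true, decide_eq_true_eq]
      constructor
      · intro hfalse; cases hfalse
      · rintro ⟨hhead, -⟩; exact absurd hhead hc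
    · rw [if_neg hgt, ih, Bool.eq_iff_iff]
      simp only [List.all_eq_true, decide_eq_true_eq, Bool.and_eq_true]
      constructor
      · intro hall
        constructor
        · by_cases hmem : day ∈ rest.map Prod.fst
          · have := hall day hmem
            rw [PySem.Dict.getD_insert_self] at this
            rw [List.count_cons_self]
            push_cast at this ⊢
            omega
          · have h0 : (rest.map Prod.fst).count day = 0 := List.count_eq_zero.mpr hmem
            rw [List.count_cons_self, h0]
            push_cast
            omega
        · intro x hx
          have := hall x hx
          by_cases hxd : x = day
          · subst hxd
            rw [PySem.Dict.getD_insert_self] at this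
            rw [List.count_cons_self]
            push_cast at this ⊢
            omega
          · rw [PySem.Dict.getD_insert_of_ne (hne := hxd)] at this
            rw [List.count_cons_of_ne (by simpa using (Ne.symm hxd))]
            exact this
      · rintro ⟨hhead, htail⟩ x hx
        by_cases hxd : x = day
        · subst hxd
          rw [PySem.Dict.getD_insert_self]
          rw [List.count_cons_self] at hhead
          push_cast at hhead ⊢
          omega
        · rw [PySem.Dict.getD_insert_of_ne (hne := hxd)]
          have := htail x hx
          rw [List.count_cons_of_ne (by simpa using (Ne.symm hxd))] at this
          exact this

-- ===== VERDICT (by name: the statement is the Claim_ definition above) =====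
theorem validate_weekly_distribution_spec : Claim_equal_validate_weekly_distribution := by
  intro cs m _
  unfold Spec_validate_weekly_distribution validate_weekly_distribution validate_weekly_distribution_alt
  rw [vwdLoop_eq]
  simp [PySem.Dict.getD_empty]
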